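-- pv_equiv track=rewrite | github.com/matteocourthoud/fantabasket-app | src/scraping/scrape_lineups.py | _remove_suffixes
-- ===== SOURCE A (Python) =====
-- def _remove_suffixes(strings: list[str]) -> tuple[list[str], list[str]]:
--     suffixes = {
--         "Q": "questionable",
--         "P": "probable",
--         "IN": "injured",
--         "Off Inj": "off injury",
--     }
--     cleaned_strings = []
--     statuses = []
--     for s in strings:
--         status = ""
--         for suffix in suffixes:
--             if s.endswith(suffix):
--                 s = s[:-len(suffix)]  # Remove the suffix
--                 status = suffixes[suffix]
--                 break  # Exit the loop once a suffix is removed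
--         statuses.append(status)
--         cleaned_strings.append(s.strip())
--     return cleaned_strings, statuses
-- ===== SOURCE B (Python) =====
-- _TAIL = {
--     "Q": ("Q", "questionable"),
--     "P": ("P", "probable"),
--     "N": ("IN", "injured"),
--     "j": ("Off Inj", "off injury"),
-- }
--
-- def _remove_suffixes(strings):
--     # Dispatch on the last character: every known suffix ends in a distinct
--     # character, so one dict lookup replaces the inner scan over the suffixes.
--     cleaned = []
--     statuses = []
--     for s in strings:
--         hit = _TAIL.get(s[-1:])
--         if hit is not None and s.endswith(hit[0]):
--             cleaned.append(s[: -len(hit[0])].strip())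
--             statuses.append(hit[1])
--         else:
--             cleaned.append(s.strip())
--             statuses.append("")
--     return cleaned, statuses
-- ===== Notes on version B (the rewrite author's own statement) =====
-- stated objective: faster
-- what changed: Replaces the inner scan over the four suffixes by a single dict lookup keyed on the string's last character (each known suffix ends in a distinct character), so each string is classified with one lookup plus one endswith check.
import Mathlib
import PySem

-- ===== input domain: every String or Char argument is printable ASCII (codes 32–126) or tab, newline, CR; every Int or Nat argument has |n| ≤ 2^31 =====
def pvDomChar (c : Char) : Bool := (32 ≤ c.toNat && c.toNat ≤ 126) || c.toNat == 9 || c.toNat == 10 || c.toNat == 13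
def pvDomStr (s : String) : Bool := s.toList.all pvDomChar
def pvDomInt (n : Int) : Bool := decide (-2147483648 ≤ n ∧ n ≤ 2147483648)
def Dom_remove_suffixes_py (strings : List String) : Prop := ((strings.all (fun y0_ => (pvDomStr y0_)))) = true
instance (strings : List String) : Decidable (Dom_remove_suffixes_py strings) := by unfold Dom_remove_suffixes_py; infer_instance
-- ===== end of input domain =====

-- B replaces A's inner scan over the four suffixes by a single dict lookup keyed on
-- the string's last character (each known suffix ends in a distinct character).

-- ===== PORT A =====
-- the `suffixes` dict of A, iterated in insertion order
def pvSuffixes : List (String × String) :=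
  [("Q", "questionable"), ("P", "probable"), ("IN", "injured"), ("Off Inj", "off injury")]

-- the inner `for suffix in suffixes: … break` loop: returns the (possibly trimmed) s and the status
def pvALoop (s : String) : List (String × String) → String × String
  | [] => (s, "")
  | (suf, st) :: rest =>
    if PySem.Str.endswith s suf then
      (PySem.Str.slice s none (some (-(PySem.Str.len suf : Int))), st)
    else pvALoop s rest

def remove_suffixes_py (strings : List String) : List String × List String :=
  strings.foldl (fun acc s =>
    let r := pvALoop s pvSuffixes
    (acc.1 ++ [PySem.Str.strip r.1], acc.2 ++ [r.2])) ([], [])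

-- ===== PORT B =====
-- the `_TAIL` dict: last character ↦ (suffix, status)
def pvTail : PySem.Dict String (String × String) :=
  PySem.Dict.ofList
    [("Q", ("Q", "questionable")), ("P", ("P", "probable")),
     ("N", ("IN", "injured")), ("j", ("Off Inj", "off injury"))]

-- body of B's loop for one string: `hit = _TAIL.get(s[-1:]) …`
def pvBOne (s : String) : String × String :=
  match pvTail.get? (PySem.Str.slice s (some (-1)) none) with
  | some hit =>
    if PySem.Str.endswith s hit.1 then
      (PySem.Str.strip (PySem.Str.slice s none (some (-(PySem.Str.len hit.1 : Int)))), hit.2)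
    else (PySem.Str.strip s, "")
  | none => (PySem.Str.strip s, "")

def remove_suffixes_py_alt (strings : List String) : List String × List String :=
  strings.foldl (fun acc s => (acc.1 ++ [(pvBOne s).1], acc.2 ++ [(pvBOne s).2])) ([], [])

-- ===== PRECONDITION & SPEC =====
def Spec_remove_suffixes_py (strings : List String) (out : List String × List String) : Prop := out = remove_suffixes_py_alt strings
instance (strings : List String) (out : List String × List String) : Decidable (Spec_remove_suffixes_py strings out) := by unfold Spec_remove_suffixes_py; infer_instance

-- ===== CLAIM (what is proved, stated in full; the proofs are below) =====
def Claim_equal_remove_suffixes_py : Prop := ∀ (strings : List String), Dom_remove_suffixes_py strings → Spec_remove_suffixes_py strings (remove_suffixes_py strings)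

-- ===== LEMMAS AND PROOFS =====

-- endswith is false when the last characters disagree
theorem pv_ends_false (s p : List Char) (hp : p ≠ [])
    (h : s.getLast? ≠ p.getLast?) : PySem.Chars.endswith s p = false := by
  cases hE : PySem.Chars.endswith s p with
  | false => rfl
  | true =>
    exfalso
    rcases (PySem.Chars.endswith_iff _ _).mp hE with ⟨t, ht⟩
    rcases p.eq_nil_or_concat with rfl | ⟨q, d, rfl⟩
    · exact hp rfl
    · apply h
      rw [← ht]
      simp [List.concat_eq_append, ← List.append_assoc]

-- a one-character suffix matches exactly the last character
theorem pv_ends_single (l : List Char) (c : Char) :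
    PySem.Chars.endswith (l ++ [c]) [c] = true :=
  (PySem.Chars.endswith_iff _ _).mpr ⟨l, rfl⟩

theorem pv_key_toList (s : String) :
    (PySem.Str.slice s (some (-1)) none).toList = s.toList.drop (s.toList.length - 1) := by
  simp [PySem.List.slice_from_neg_one]

theorem pvTail_mk : pvTail = PySem.Dict.mk
    [("Q", ("Q", "questionable")), ("P", ("P", "probable")),
     ("N", ("IN", "injured")), ("j", ("Off Inj", "off injury"))] := by decide

theorem pv_get?_nil (k : String) :
    (PySem.Dict.mk ([] : List (String × (String × String)))).get? k = none := by
  simp [PySem.Dict.get?]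

-- one string: stripping A's loop result equals B's dispatch on the last character
set_option maxHeartbeats 1000000 in
theorem pv_one_eq (s : String) :
    (PySem.Str.strip (pvALoop s pvSuffixes).1, (pvALoop s pvSuffixes).2) = pvBOne s := by
  rcases s.toList.eq_nil_or_concat with hnil | ⟨l, c, hcat⟩
  · have hkey : PySem.Str.slice s (some (-1)) none = "" := by
      apply String.toList_inj.mp
      rw [pv_key_toList, hnil]; rfl
    have hQ := pv_ends_false s.toList ['Q'] (by decide) (by rw [hnil]; decide)
    have hP := pv_ends_false s.toList ['P'] (by decide) (by rw [hnil]; decide)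
    have hN := pv_ends_false s.toList ['I','N'] (by decide) (by rw [hnil]; decide)
    have hJ := pv_ends_false s.toList ['O','f','f',' ','I','n','j'] (by decide) (by rw [hnil]; decide)
    simp [pvALoop, pvSuffixes, pvBOne, hkey, hQ, hP, hN, hJ, pvTail_mk, PySem.Dict.get?_mk_cons, pv_get?_nil]
  · rw [List.concat_eq_append] at hcat
    have hlast : s.toList.getLast? = some c := by rw [hcat]; simp
    have hkeyL : (PySem.Str.slice s (some (-1)) none).toList = [c] := by
      rw [pv_key_toList, hcat]; simp
    by_cases hc : c = 'Q'
    · subst hc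
      have hkey : PySem.Str.slice s (some (-1)) none = "Q" := String.toList_inj.mp hkeyL
      have hQ : PySem.Chars.endswith s.toList ['Q'] = true := by
        rw [hcat]; exact pv_ends_single l 'Q'
      simp [pvALoop, pvSuffixes, pvBOne, hkey, hQ, pvTail_mk, PySem.Dict.get?_mk_cons]
    by_cases hc2 : c = 'P'
    · subst hc2
      have hkey : PySem.Str.slice s (some (-1)) none = "P" := String.toList_inj.mp hkeyL
      have hQ := pv_ends_false s.toList ['Q'] (by decide) (by rw [hlast]; simp [hc])
      have hP : PySem.Chars.endswith s.toList ['P'] = true := by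
        rw [hcat]; exact pv_ends_single l 'P'
      simp [pvALoop, pvSuffixes, pvBOne, hkey, hQ, hP, pvTail_mk, PySem.Dict.get?_mk_cons]
    by_cases hc3 : c = 'N'
    · subst hc3
      have hkey : PySem.Str.slice s (some (-1)) none = "N" := String.toList_inj.mp hkeyL
      have hQ := pv_ends_false s.toList ['Q'] (by decide) (by rw [hlast]; simp [hc])
      have hP := pv_ends_false s.toList ['P'] (by decide) (by rw [hlast]; simp [hc2])
      have hJ := pv_ends_false s.toList ['O','f','f',' ','I','n','j'] (by decide)
        (by rw [hlast]; decide)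
      cases hIN : PySem.Chars.endswith s.toList ['I','N'] with
      | true =>
        simp [pvALoop, pvSuffixes, pvBOne, hkey, hQ, hP, hIN, pvTail_mk, PySem.Dict.get?_mk_cons]
      | false =>
        simp [pvALoop, pvSuffixes, pvBOne, hkey, hQ, hP, hIN, hJ, pvTail_mk, PySem.Dict.get?_mk_cons]
    by_cases hc4 : c = 'j'
    · subst hc4
      have hkey : PySem.Str.slice s (some (-1)) none = "j" := String.toList_inj.mp hkeyL
      have hQ := pv_ends_false s.toList ['Q'] (by decide) (by rw [hlast]; simp [hc])
      have hP := pv_ends_false s.toList ['P'] (by decide) (by rw [hlast]; simp [hc2])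
      have hN := pv_ends_false s.toList ['I','N'] (by decide) (by rw [hlast]; simp [hc3])
      cases hOI : PySem.Chars.endswith s.toList ['O','f','f',' ','I','n','j'] with
      | true =>
        simp [pvALoop, pvSuffixes, pvBOne, hkey, hQ, hP, hN, hOI, pvTail_mk, PySem.Dict.get?_mk_cons]
      | false =>
        simp [pvALoop, pvSuffixes, pvBOne, hkey, hQ, hP, hN, hOI, pvTail_mk, PySem.Dict.get?_mk_cons]
    · have e1 : (("Q" : String) == PySem.Str.slice s (some (-1)) none) = false :=
        beq_eq_false_iff_ne.mpr (fun h => hc (by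
          have h2 := congrArg String.toList h
          rw [hkeyL] at h2
          injection h2 with h1; exact h1.symm))
      have e2 : (("P" : String) == PySem.Str.slice s (some (-1)) none) = false :=
        beq_eq_false_iff_ne.mpr (fun h => hc2 (by
          have h2 := congrArg String.toList h
          rw [hkeyL] at h2
          injection h2 with h1; exact h1.symm))
      have e3 : (("N" : String) == PySem.Str.slice s (some (-1)) none) = false :=
        beq_eq_false_iff_ne.mpr (fun h => hc3 (by
          have h2 := congrArg String.toList h
          rw [hkeyL] at h2
          injection h2 with h1; exact h1.symm))
      have e4 : (("j" : String) == PySem.Str.slice s (some (-1)) none) = false :=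
        beq_eq_false_iff_ne.mpr (fun h => hc4 (by
          have h2 := congrArg String.toList h
          rw [hkeyL] at h2
          injection h2 with h1; exact h1.symm))
      have hQ := pv_ends_false s.toList ['Q'] (by decide) (by rw [hlast]; simp [hc])
      have hP := pv_ends_false s.toList ['P'] (by decide) (by rw [hlast]; simp [hc2])
      have hN := pv_ends_false s.toList ['I','N'] (by decide) (by rw [hlast]; simp [hc3])
      have hJ := pv_ends_false s.toList ['O','f','f',' ','I','n','j'] (by decide)
        (by rw [hlast]; simp [hc4])
      simp [pvALoop, pvSuffixes, pvBOne, pvTail_mk, PySem.Dict.get?_mk_cons, e1, e2, e3, e4,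
        hQ, hP, hN, hJ, pv_get?_nil]

-- the two per-element step functions of the folds are equal
theorem pv_step_eq :
    (fun (acc : List String × List String) s =>
      let r := pvALoop s pvSuffixes
      ((acc.1 ++ [PySem.Str.strip r.1], acc.2 ++ [r.2]) : List String × List String))
    = fun (acc : List String × List String) s => (acc.1 ++ [(pvBOne s).1], acc.2 ++ [(pvBOne s).2]) := by
  funext acc s
  rw [← pv_one_eq s]

-- ===== VERDICT (by name: the statement is the Claim_ definition above) =====
theorem remove_suffixes_py_spec : Claim_equal_remove_suffixes_py := by
  intro strings _
  unfold Spec_remove_suffixes_py remove_suffixes_py remove_suffixes_py_alt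
  rw [pv_step_eq]
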